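-- pv_equiv track=rewrite | github.com/lucas92ag/parcial-tecnicas-programacion | Ejercicio_3.py | chequeaIgualdadDePuntos
-- ===== SOURCE A (Python) =====
-- def chequeaIgualdadDePuntos(dict):
--
--     resultado = None
--     point = list(dict.values())
--     point1 = point[0]
--     for score in point[1:]:
--         if score == point1:
--             resultado = False
--         else:
--             resultado = True
--     return resultado
-- ===== SOURCE B (Python) =====
-- def chequeaIgualdadDePuntos(dict):
--     vals = list(dict.values())
--     if len(vals) == 1:
--         return None
--     return vals[-1] != vals[0]
-- ===== Notes on version B (the rewrite author's own statement) =====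
-- stated objective: simpler
-- what changed: A's loop overwrites its result on every iteration, so only the last value matters; B drops the loop and returns vals[-1] != vals[0] directly (None when there is a single value, as A returns).
import Mathlib
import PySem

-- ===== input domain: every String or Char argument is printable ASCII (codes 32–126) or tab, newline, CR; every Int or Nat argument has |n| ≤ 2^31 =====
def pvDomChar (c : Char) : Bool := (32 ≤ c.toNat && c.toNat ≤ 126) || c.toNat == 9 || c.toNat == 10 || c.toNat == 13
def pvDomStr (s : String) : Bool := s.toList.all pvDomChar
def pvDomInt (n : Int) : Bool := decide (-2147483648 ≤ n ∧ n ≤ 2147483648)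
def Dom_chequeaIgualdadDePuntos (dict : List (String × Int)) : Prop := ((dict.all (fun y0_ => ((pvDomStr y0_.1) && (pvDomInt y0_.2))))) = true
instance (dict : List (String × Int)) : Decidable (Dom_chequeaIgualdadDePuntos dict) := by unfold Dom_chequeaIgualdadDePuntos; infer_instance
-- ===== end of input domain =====

-- B replaces A's result-overwriting loop by a direct comparison of the last and first dict values (simpler; same behaviour).


-- ===== PORT A =====
def chequeaIgualdadDePuntos (dict : List (String × Int)) : Option Bool :=
  match PySem.List.pyGet? (PySem.Dict.ofList dict).values 0 with
  | none => none   -- IndexError on an empty dict: excluded by Pre_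
  | some point1 =>
      (PySem.List.slice (PySem.Dict.ofList dict).values (some 1) none).foldl
        (fun _resultado score => if score = point1 then some false else some true) none

-- ===== PORT B =====
def chequeaIgualdadDePuntos_alt (dict : List (String × Int)) : Option Bool :=
  if (PySem.Dict.ofList dict).values.length = 1 then none
  else
    match PySem.List.pyGet? (PySem.Dict.ofList dict).values (-1),
          PySem.List.pyGet? (PySem.Dict.ofList dict).values 0 with
    | some last, some first => some (decide (last ≠ first))
    | _, _ => none   -- IndexError on an empty dict: excluded by Pre_

-- ===== PRECONDITION & SPEC =====
-- Pre_ excludes only the empty dict, on which A raises IndexError (point[0]).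
def Pre_chequeaIgualdadDePuntos (dict : List (String × Int)) : Prop := dict ≠ []
instance (dict : List (String × Int)) : Decidable (Pre_chequeaIgualdadDePuntos dict) := by unfold Pre_chequeaIgualdadDePuntos; infer_instance
def pvWitness_chequeaIgualdadDePuntos : (List (String × Int)) := [("a", 1), ("b", 2)]

def Spec_chequeaIgualdadDePuntos (dict : List (String × Int)) (out : Option Bool) : Prop := out = chequeaIgualdadDePuntos_alt dict
instance (dict : List (String × Int)) (out : Option Bool) : Decidable (Spec_chequeaIgualdadDePuntos dict out) := by unfold Spec_chequeaIgualdadDePuntos; infer_instance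

-- ===== CLAIM (what is proved, stated in full; the proofs are below) =====
def Claim_equal_chequeaIgualdadDePuntos : Prop := ∀ (dict : List (String × Int)), Dom_chequeaIgualdadDePuntos dict → Pre_chequeaIgualdadDePuntos dict → Spec_chequeaIgualdadDePuntos dict (chequeaIgualdadDePuntos dict)

-- ===== LEMMAS AND PROOFS =====

-- insert never empties a dict's item list
theorem pv_items_insert_ne_nil (d : PySem.Dict String Int) (k : String) (v : Int) :
    (d.insert k v).items ≠ [] := by
  by_cases h : d.contains k = true
  · rw [PySem.Dict.items_insert_of_contains d v h]
    have hk : k ∈ d.keys := (PySem.Dict.contains_iff_mem_keys d k).mp h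
    have : d.items ≠ [] := by
      intro he
      simp [PySem.Dict.keys, he] at hk
    simpa using this
  · rw [PySem.Dict.items_insert_of_not_contains d v (by simpa using h)]
    simp

theorem pv_foldl_insert_items_ne_nil :
    ∀ (l : List (String × Int)) (d : PySem.Dict String Int),
      d.items ≠ [] → (l.foldl (fun acc p => acc.insert p.1 p.2) d).items ≠ [] := by
  intro l
  induction l with
  | nil => intro d h; simpa using h
  | cons p t ih =>
      intro d _
      simpa using ih (d.insert p.1 p.2) (pv_items_insert_ne_nil d p.1 p.2)

theorem pv_values_ofList_ne_nil (p : String × Int) (rest : List (String × Int)) :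
    (PySem.Dict.ofList (p :: rest)).values ≠ [] := by
  have h : (PySem.Dict.ofList (p :: rest)).items ≠ [] := by
    show ((p :: rest).foldl (fun acc q => acc.insert q.1 q.2) PySem.Dict.empty).items ≠ []
    simpa using pv_foldl_insert_items_ne_nil rest (PySem.Dict.empty.insert p.1 p.2)
      (pv_items_insert_ne_nil _ p.1 p.2)
  intro he
  apply h
  have : (PySem.Dict.ofList (p :: rest)).items.map (·.2) = [] := he
  exact List.map_eq_nil_iff.mp this

-- xs[-1] is the last element of a nonempty list
theorem pv_pyGet_neg_one (l : List Int) (hl : l ≠ []) :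
    PySem.List.pyGet? l (-1) = l.getLast? := by
  have h1 : 1 ≤ l.length := List.length_pos_iff.mpr hl
  simp [PySem.List.pyGet?, PySem.List.pyIdx?, h1, List.getLast?_eq_getElem?]

-- A's loop keeps only the contribution of the LAST element
theorem pv_foldl_last (g : Int → Option Bool) :
    ∀ (l : List Int) (init : Option Bool),
      l.foldl (fun _ s => g s) init = (l.getLast?).elim init g := by
  intro l
  induction l with
  | nil => intro init; simp
  | cons h t ih =>
      intro init
      cases t with
      | nil => simp
      | cons s t' => simpa using ih (g h)

-- ===== VERDICT (by name: the statement is the Claim_ definition above) =====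
theorem chequeaIgualdadDePuntos_spec : Claim_equal_chequeaIgualdadDePuntos := by
  intro dict _ hpre
  unfold Spec_chequeaIgualdadDePuntos chequeaIgualdadDePuntos chequeaIgualdadDePuntos_alt
  cases hd : (PySem.Dict.ofList dict).values with
  | nil =>
      exfalso
      cases dict with
      | nil => exact hpre rfl
      | cons p rest => exact pv_values_ofList_ne_nil p rest hd
  | cons h t =>
      rw [PySem.List.slice_from_one]
      have hget0 : PySem.List.pyGet? (h :: t) 0 = some h := by
        simp [PySem.List.pyGet?, PySem.List.pyIdx?]
      rw [hget0]
      simp only [List.tail_cons]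
      rw [pv_foldl_last (fun s => if s = h then some false else some true)]
      cases t with
      | nil => simp
      | cons s t' =>
          have hlen : (h :: s :: t').length ≠ 1 := by simp
          simp only [hlen, if_false]
          rw [pv_pyGet_neg_one _ (by simp), List.getLast?_cons_cons]
          cases hx : (s :: t').getLast? with
          | none => simp at hx
          | some x =>
              simp only [Option.elim_some]
              split_ifs with he <;> simp [he]
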